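-- pv_equiv track=rewrite | github.com/shrreku/tutorAI | backend/app/agents/curriculum_agent.py | _build_prereq_chains
-- ===== SOURCE A (Python) =====
-- from collections import defaultdict
--
-- def _build_prereq_chains(
--
--     prereq_hints: list[dict],
--     concepts: list[str],
-- ) -> list[list[str]]:
--     adjacency: dict[str, list[tuple[str, int]]] = defaultdict(list)
--     incoming: set[str] = set()
--     for hint in prereq_hints:
--         source = hint.get("source")
--         target = hint.get("target")
--         support = int(hint.get("support_count", 0) or 0)
--         if not source or not target or source == target:
--             continue
--         adjacency[source].append((target, support))
--         incoming.add(target)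
--
--     roots = [
--         concept
--         for concept in concepts
--         if concept in adjacency and concept not in incoming
--     ]
--     if not roots:
--         roots = [concept for concept in concepts if concept in adjacency][:6]
--
--     chains: list[list[str]] = []
--     seen_paths: set[tuple[str, ...]] = set()
--
--     def _walk(node: str, path: list[str]) -> None:
--         if len(chains) >= 8:
--             return
--         next_nodes = sorted(
--             adjacency.get(node, []),
--             key=lambda item: (-item[1], item[0]),
--         )
--         if not next_nodes and len(path) >= 2:
--             path_key = tuple(path)
--             if path_key not in seen_paths:
--                 seen_paths.add(path_key)
--                 chains.append(path[:])
--             return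
--         for next_node, _support in next_nodes[:3]:
--             if next_node in path or len(path) >= 4:
--                 continue
--             _walk(next_node, path + [next_node])
--
--     for root in roots[:6]:
--         _walk(root, [root])
--         if len(chains) >= 8:
--             break
--
--     return chains
-- ===== SOURCE B (Python) =====
-- def _build_prereq_chains(
--     prereq_hints: list[dict],
--     concepts: list[str],
-- ) -> list[list[str]]:
--     # Pass 1: parse hints into a flat edge list, then group.
--     edges = []
--     for hint in prereq_hints:
--         source = hint.get("source")
--         target = hint.get("target")
--         support = int(hint.get("support_count", 0) or 0)
--         if source and target and source != target:
--             edges.append((source, target, support))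
--
--     adjacency: dict[str, list[tuple[str, int]]] = {}
--     incoming = set()
--     for source, target, support in edges:
--         adjacency.setdefault(source, []).append((target, support))
--         incoming.add(target)
--
--     roots = [c for c in concepts if c in adjacency and c not in incoming]
--     if not roots:
--         roots = [c for c in concepts if c in adjacency][:6]
--
--     # Pure bounded enumeration of dead-end paths (no shared mutable state).
--     def paths_from(path):
--         nxt = sorted(adjacency.get(path[-1], []), key=lambda it: (-it[1], it[0]))
--         if not nxt:
--             return [path] if len(path) >= 2 else []
--         out = []
--         for node, _ in nxt[:3]:
--             if node not in path and len(path) < 4: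
--                 out.extend(paths_from(path + [node]))
--         return out
--
--     candidates = []
--     for root in roots[:6]:
--         candidates.extend(paths_from([root]))
--
--     # Single dedup-and-truncate pass.
--     chains = []
--     seen = set()
--     for path in candidates:
--         key = tuple(path)
--         if len(chains) < 8 and key not in seen:
--             seen.add(key)
--             chains.append(path)
--     return chains
-- ===== Notes on version B (the rewrite author's own statement) =====
-- stated objective: alternative
-- what changed: A's recursive _walk threads mutable chains/seen_paths state with per-call >=8 early exits and a break in the root loop; B purely enumerates the bounded dead-end paths per root (no shared state), concatenates them, and applies one separate dedup-and-truncate pass (and builds the graph by a parse-then-group two-pass).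
import Mathlib
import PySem

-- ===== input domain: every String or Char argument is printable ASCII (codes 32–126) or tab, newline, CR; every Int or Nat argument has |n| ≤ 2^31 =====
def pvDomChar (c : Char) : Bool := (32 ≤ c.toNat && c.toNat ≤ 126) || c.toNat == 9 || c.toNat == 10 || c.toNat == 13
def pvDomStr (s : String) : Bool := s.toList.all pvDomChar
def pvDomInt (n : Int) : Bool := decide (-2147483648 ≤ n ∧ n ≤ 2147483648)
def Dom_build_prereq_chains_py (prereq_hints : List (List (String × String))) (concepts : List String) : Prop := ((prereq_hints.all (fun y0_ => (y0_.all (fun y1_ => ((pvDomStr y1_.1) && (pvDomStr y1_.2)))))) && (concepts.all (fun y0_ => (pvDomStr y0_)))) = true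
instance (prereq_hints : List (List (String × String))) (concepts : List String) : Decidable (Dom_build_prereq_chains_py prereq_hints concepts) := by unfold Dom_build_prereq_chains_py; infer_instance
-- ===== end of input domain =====

-- B replaces A's stateful recursive _walk (shared chains/seen_paths mutation with per-call
-- early exits) by a pure bounded path enumeration followed by ONE dedup-and-truncate pass.

-- ===== PORT A =====

-- int(hint.get("support_count", 0) or 0); exact under Pre_ (excludes the ValueError inputs)
def pvSupportA (hint : List (String × String)) : Int :=
  match List.lookup "support_count" hint with
  | none => 0
  | some s => if s = "" then 0 else (PySem.Int.ofStr? s).getD 0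

-- one iteration of A's graph-building loop (defaultdict append + incoming.add)
def pvStepGraphA (st : PySem.Dict String (List (String × Int)) × PySem.Set String)
    (hint : List (String × String)) : PySem.Dict String (List (String × Int)) × PySem.Set String :=
  match List.lookup "source" hint, List.lookup "target" hint with
  | some source, some target =>
      if source = "" ∨ target = "" ∨ source = target then st
      else (st.1.modify source [] (fun l => l ++ [(target, pvSupportA hint)]), st.2.add target)
  | _, _ => st

mutual
-- A's recursive _walk (st = (chains, seen_paths))
def pvWalkA (adj : PySem.Dict String (List (String × Int))) (node : String) (path : List String)
    (st : List (List String) × PySem.Set (List String)) :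
    List (List String) × PySem.Set (List String) :=
  if 8 ≤ st.1.length then st
  else
    let nextNodes := PySem.List.sorted2 (adj.getD node []) (fun it => -it.2) (fun it => it.1)
    if nextNodes = [] ∧ 2 ≤ path.length then
      if PySem.Set.contains st.2 path then st else (st.1 ++ [path], PySem.Set.add st.2 path)
    else
      pvWalkListA adj path (nextNodes.take 3) st
  termination_by (4 - path.length) * 10 + 5
  decreasing_by all_goals simp_wf

-- A's 'for next_node, _support in next_nodes[:3]' loop
def pvWalkListA (adj : PySem.Dict String (List (String × Int))) (path : List String)
    (items : List (String × Int)) (st : List (List String) × PySem.Set (List String)) :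
    List (List String) × PySem.Set (List String) :=
  match items with
  | [] => st
  | (nn, _) :: rest =>
      let st' := if nn ∈ path ∨ 4 ≤ path.length then st else pvWalkA adj nn (path ++ [nn]) st
      pvWalkListA adj path rest st'
  termination_by (4 - path.length) * 10 + items.length
  decreasing_by all_goals (simp_wf <;> omega)
end

-- A's 'for root in roots[:6]: _walk(...); if len(chains) >= 8: break'
def pvRootsLoopA (adj : PySem.Dict String (List (String × Int))) (rs : List String)
    (st : List (List String) × PySem.Set (List String)) :
    List (List String) × PySem.Set (List String) :=
  match rs with
  | [] => st
  | r :: rest =>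
      let st' := pvWalkA adj r [r] st
      if 8 ≤ st'.1.length then st' else pvRootsLoopA adj rest st'

def build_prereq_chains_py (prereq_hints : List (List (String × String))) (concepts : List String) :
    List (List String) :=
  let g := prereq_hints.foldl pvStepGraphA (PySem.Dict.empty, PySem.Set.empty)
  let adjacency := g.1
  let incoming := g.2
  let roots0 := concepts.filter (fun c => adjacency.contains c ∧ ¬ PySem.Set.contains incoming c)
  let roots := if roots0 = [] then (concepts.filter (fun c => adjacency.contains c)).take 6 else roots0
  (pvRootsLoopA adjacency (roots.take 6) ([], PySem.Set.empty)).1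

-- ===== PORT B =====

-- B's parse of one hint into an optional edge (support as in A's int(... or 0))
def pvParseEdgeB (hint : List (String × String)) : Option (String × String × Int) :=
  match List.lookup "source" hint, List.lookup "target" hint with
  | some source, some target =>
      if source ≠ "" ∧ target ≠ "" ∧ source ≠ target then
        some (source, target,
          (match List.lookup "support_count" hint with
           | none => 0
           | some s => if s = "" then 0 else (PySem.Int.ofStr? s).getD 0))
      else none
  | _, _ => none

-- B's grouping pass over the flat edge list
def pvStepGroupB (st : PySem.Dict String (List (String × Int)) × PySem.Set String)
    (e : String × String × Int) : PySem.Dict String (List (String × Int)) × PySem.Set String :=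
  (st.1.modify e.1 [] (fun l => l ++ [(e.2.1, e.2.2)]), st.2.add e.2.1)

-- B's pure paths_from: all bounded dead-end paths extending 'path' (path is nonempty at
-- every call; path.getLast?.getD "" is exactly Python's path[-1] there)
def pvPathsFromB (adj : PySem.Dict String (List (String × Int))) (path : List String) :
    List (List String) :=
  let nxt := PySem.List.sorted2 (adj.getD ((path.getLast?).getD "") [])
      (fun it => -it.2) (fun it => it.1)
  if nxt = [] then (if 2 ≤ path.length then [path] else [])
  else
    (nxt.take 3).flatMap (fun it =>
      if _h : it.1 ∉ path ∧ path.length < 4 then pvPathsFromB adj (path ++ [it.1]) else [])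
termination_by 4 - path.length
decreasing_by simp_wf; omega

-- B's final dedup-and-truncate step
def pvFoldStepB (st : List (List String) × PySem.Set (List String)) (path : List String) :
    List (List String) × PySem.Set (List String) :=
  if st.1.length < 8 ∧ ¬ PySem.Set.contains st.2 path then (st.1 ++ [path], PySem.Set.add st.2 path)
  else st

def build_prereq_chains_py_alt (prereq_hints : List (List (String × String)))
    (concepts : List String) : List (List String) :=
  let edges := prereq_hints.filterMap pvParseEdgeB
  let g := edges.foldl pvStepGroupB (PySem.Dict.empty, PySem.Set.empty)
  let adjacency := g.1
  let incoming := g.2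
  let roots0 := concepts.filter (fun c => adjacency.contains c ∧ ¬ PySem.Set.contains incoming c)
  let roots := if roots0 = [] then (concepts.filter (fun c => adjacency.contains c)).take 6 else roots0
  let candidates := (roots.take 6).flatMap (fun r => pvPathsFromB adjacency [r])
  (candidates.foldl pvFoldStepB ([], PySem.Set.empty)).1

-- ===== PRECONDITION & SPEC =====

-- Pre_ excludes exactly the inputs where A raises ValueError: a hint whose first
-- "support_count" value is a non-empty string that int() cannot parse.
def Pre_build_prereq_chains_py (prereq_hints : List (List (String × String))) (concepts : List String) : Prop :=
  (prereq_hints.all (fun hint =>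
    match List.lookup "support_count" hint with
    | none => true
    | some s => s == "" || (PySem.Int.ofStr? s).isSome)) = true
instance (prereq_hints : List (List (String × String))) (concepts : List String) : Decidable (Pre_build_prereq_chains_py prereq_hints concepts) := by unfold Pre_build_prereq_chains_py; infer_instance

def pvWitness_build_prereq_chains_py : (List (List (String × String))) × List String :=
  ([[("source", "a"), ("target", "b"), ("support_count", "1")]], ["a", "b"])

def Spec_build_prereq_chains_py (prereq_hints : List (List (String × String))) (concepts : List String) (out : List (List String)) : Prop := out = build_prereq_chains_py_alt prereq_hints concepts
instance (prereq_hints : List (List (String × String))) (concepts : List String) (out : List (List String)) : Decidable (Spec_build_prereq_chains_py prereq_hints concepts out) := by unfold Spec_build_prereq_chains_py; infer_instance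

-- ===== CLAIM (what is proved, stated in full; the proofs are below) =====
def Claim_equal_build_prereq_chains_py : Prop := ∀ (prereq_hints : List (List (String × String))) (concepts : List String), Dom_build_prereq_chains_py prereq_hints concepts → Pre_build_prereq_chains_py prereq_hints concepts → Spec_build_prereq_chains_py prereq_hints concepts (build_prereq_chains_py prereq_hints concepts)

-- ===== LEMMAS AND PROOFS =====

-- one hint of A's loop = B's parse, then (maybe) B's group step
theorem pv_step_eq (st : PySem.Dict String (List (String × Int)) × PySem.Set String)
    (hint : List (String × String)) :
    pvStepGraphA st hint =
      (match pvParseEdgeB hint with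
       | none => st
       | some e => pvStepGroupB st e) := by
  unfold pvStepGraphA pvParseEdgeB pvSupportA pvStepGroupB
  cases List.lookup "source" hint <;> cases List.lookup "target" hint <;> dsimp only
  case some.some source target =>
    by_cases h : source = "" ∨ target = "" ∨ source = target
    · rw [if_pos h, if_neg (by tauto)]
    · rw [if_neg h, if_pos (by tauto)]

-- A's skip-or-append loop over hints equals B's parse-then-group two-pass
theorem pv_graph_eq (hints : List (List (String × String)))
    (st : PySem.Dict String (List (String × Int)) × PySem.Set String) :
    hints.foldl pvStepGraphA st = (hints.filterMap pvParseEdgeB).foldl pvStepGroupB st := by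
  induction hints generalizing st with
  | nil => rfl
  | cons h t ih =>
      simp only [List.foldl_cons, List.filterMap_cons, pv_step_eq st h]
      cases pvParseEdgeB h <;> simp [ih]

-- once 8 chains exist the dedup pass is the identity
theorem pv_fold_fix (xs : List (List String)) (st : List (List String) × PySem.Set (List String))
    (h : 8 ≤ st.1.length) : xs.foldl pvFoldStepB st = st := by
  induction xs with
  | nil => rfl
  | cons x t ih => simp only [List.foldl_cons, pvFoldStepB]; rw [if_neg (by omega)]; exact ih

-- A's stateful walk = B's pure enumeration folded through the dedup step
theorem pv_walk_eq (adj : PySem.Dict String (List (String × Int))) :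
    ∀ (k : Nat) (path : List String), 4 - path.length < k →
      (∀ node st, path.getLast? = some node →
        pvWalkA adj node path st = (pvPathsFromB adj path).foldl pvFoldStepB st) := by
  intro k
  induction k with
  | zero => omega
  | succ k ih =>
    intro path hk node st hlast
    rw [pvWalkA, pvPathsFromB]
    simp only [hlast, Option.getD_some]
    by_cases h8 : 8 ≤ st.1.length
    · rw [if_pos h8, pv_fold_fix _ _ h8]
    · rw [if_neg h8]
      set nxt := PySem.List.sorted2 (adj.getD node []) (fun it => -it.2) (fun it => it.1) with hnxt
      by_cases hnil : nxt = []
      · by_cases hlen : 2 ≤ path.length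
        · rw [if_pos ⟨hnil, hlen⟩, hnil, if_pos rfl, if_pos hlen]
          simp only [List.foldl_cons, List.foldl_nil, pvFoldStepB]
          by_cases hc : PySem.Set.contains st.2 path
          · rw [if_pos hc, if_neg (fun h => h.2 hc)]
          · rw [if_neg hc, if_pos ⟨by omega, hc⟩]
        · rw [if_neg (by tauto), hnil, if_pos rfl, if_neg hlen]
          simp [pvWalkListA]
      · rw [if_neg (by tauto), if_neg hnil]
        -- the child loop
        have hmain : ∀ (items : List (String × Int)) (st : List (List String) × PySem.Set (List String)),
            pvWalkListA adj path items st =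
              (items.flatMap (fun it =>
                if _h : it.1 ∉ path ∧ path.length < 4 then pvPathsFromB adj (path ++ [it.1]) else [])).foldl
                pvFoldStepB st := by
          intro items
          induction items with
          | nil => intro st; rw [pvWalkListA]; rfl
          | cons it rest ihr =>
            intro st
            obtain ⟨nn, sup⟩ := it
            rw [pvWalkListA]
            by_cases hskip : nn ∈ path ∨ 4 ≤ path.length
            · simp only [if_pos hskip]
              rw [List.flatMap_cons,
                dif_neg (fun hc => hskip.elim (fun hm => hc.1 hm) (fun hl => by omega))]
              simp only [List.nil_append]; exact ihr st
            · simp only [if_neg hskip]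
              push Not at hskip
              rw [List.flatMap_cons, dif_pos ⟨hskip.1, by omega⟩, List.foldl_append, ← ihr]
              congr 1
              exact ih (path ++ [nn])
                (by simp only [List.length_append, List.length_cons, List.length_nil]; omega) nn st
                (by simp)
        exact hmain _ st

-- A's root loop with its break = fold of the dedup step over B's candidate list
theorem pv_roots_eq (adj : PySem.Dict String (List (String × Int))) (rs : List String)
    (st : List (List String) × PySem.Set (List String)) :
    pvRootsLoopA adj rs st =
      (rs.flatMap (fun r => pvPathsFromB adj [r])).foldl pvFoldStepB st := by
  induction rs generalizing st with
  | nil => rfl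
  | cons r rest ihr =>
    rw [pvRootsLoopA]
    have hw : pvWalkA adj r [r] st = (pvPathsFromB adj [r]).foldl pvFoldStepB st :=
      pv_walk_eq adj 5 [r] (by simp) r st (by simp)
    simp only [List.flatMap_cons, List.foldl_append, ← hw]
    by_cases h8 : 8 ≤ (pvWalkA adj r [r] st).1.length
    · rw [if_pos h8, pv_fold_fix _ _ h8]
    · rw [if_neg h8]; exact ihr _

-- ===== VERDICT (by name: the statement is the Claim_ definition above) =====
theorem build_prereq_chains_py_spec : Claim_equal_build_prereq_chains_py := by
  intro hints concepts _ _
  unfold Spec_build_prereq_chains_py build_prereq_chains_py build_prereq_chains_py_alt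
  simp only [pv_graph_eq, pv_roots_eq]
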